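-- pv_equiv track=rewrite | github.com/ImanTabari/Algorithm | 3-Greedy/GreedyPairwiseDistinctSummand.py | Pairwise_Distinct_Summand
-- ===== SOURCE A (Python) =====
-- def Pairwise_Distinct_Summand(fnum):
--     summmand_list = []
--     summand_num_pair = [1,fnum]
--     while True:
--         if 2*summand_num_pair[0] >= summand_num_pair[1]:
--             summmand_list.append(summand_num_pair[1])
--             break
--         else:
--             summmand_list.append(summand_num_pair[0])
--             summand_num_pair[1] -= summand_num_pair[0]
--             summand_num_pair[0] +=1
--     return summmand_list
-- ===== SOURCE B (Python) =====
-- from math import isqrt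
--
-- def Pairwise_Distinct_Summand(fnum):
--     if fnum <= 2:
--         return [fnum]
--     # largest k with k*(k+1)//2 <= fnum; the loop in A stops exactly at index k
--     k = (isqrt(8 * fnum + 1) - 1) // 2
--     return list(range(1, k)) + [fnum - (k - 1) * k // 2]
-- ===== Notes on version B (the rewrite author's own statement) =====
-- stated objective: simpler
-- what changed: Replaces A's subtractive while-loop with a closed form: the stop index k is computed by integer square root (largest k with k(k+1)/2 <= fnum) and the result is range(1,k) plus the absorbed last summand fnum - (k-1)*k//2; degenerate inputs take A's immediate-stop branch.
import Mathlib
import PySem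

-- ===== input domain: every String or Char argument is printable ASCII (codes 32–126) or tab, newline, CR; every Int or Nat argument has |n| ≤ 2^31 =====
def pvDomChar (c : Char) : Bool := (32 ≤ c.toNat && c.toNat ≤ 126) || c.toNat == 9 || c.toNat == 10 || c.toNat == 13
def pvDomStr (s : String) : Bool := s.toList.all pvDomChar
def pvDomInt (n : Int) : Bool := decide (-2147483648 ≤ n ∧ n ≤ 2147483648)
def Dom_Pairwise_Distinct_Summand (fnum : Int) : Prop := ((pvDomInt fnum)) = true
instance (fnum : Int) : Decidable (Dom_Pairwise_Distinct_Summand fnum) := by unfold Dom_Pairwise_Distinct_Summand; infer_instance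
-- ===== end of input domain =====

-- B computes A's stop index in closed form via isqrt instead of A's subtractive loop (objective: simpler).

-- ===== PORT A =====
-- the while-True loop of A, with state (summand_num_pair[0], summand_num_pair[1]);
-- the appends build the returned list front-to-back.
def pvGoA (i rem : Int) : List Int :=
  if 2 * i ≥ rem then [rem]
  else i :: pvGoA (i + 1) (rem - i)
termination_by ((2 - i).toNat, (rem - 2 * i).toNat)
decreasing_by
  rcases lt_or_ge i 2 with hi | hi
  · exact Prod.Lex.left _ _ (by omega)
  · have e1 : (2 - (i + 1)).toNat = 0 := by omega
    have e2 : (2 - i).toNat = 0 := by omega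
    rw [e1, e2]
    exact Prod.Lex.right _ (by omega)

def Pairwise_Distinct_Summand (fnum : Int) : List Int := pvGoA 1 fnum

-- ===== PORT B =====
def Pairwise_Distinct_Summand_alt (fnum : Int) : List Int :=
  if fnum ≤ 2 then [fnum]
  else
    let k : Int := PySem.Int.floordiv ((Nat.sqrt (8 * fnum + 1).toNat : Int) - 1) 2
    PySem.List.pyRange 1 k 1 ++ [fnum - PySem.Int.floordiv ((k - 1) * k) 2]

-- ===== PRECONDITION & SPEC =====
def Spec_Pairwise_Distinct_Summand (fnum : Int) (out : List Int) : Prop := out = Pairwise_Distinct_Summand_alt fnum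
instance (fnum : Int) (out : List Int) : Decidable (Spec_Pairwise_Distinct_Summand fnum out) := by unfold Spec_Pairwise_Distinct_Summand; infer_instance

-- ===== CLAIM (what is proved, stated in full; the proofs are below) =====
def Claim_equal_Pairwise_Distinct_Summand : Prop := ∀ (fnum : Int), Dom_Pairwise_Distinct_Summand fnum → Spec_Pairwise_Distinct_Summand fnum (Pairwise_Distinct_Summand fnum)

-- ===== LEMMAS AND PROOFS =====

-- The loop, started at index j with remainder rem (2*rem = 2*f - (j-1)*j), runs until
-- the first index k with k*(k+1) ≤ 2*f < (k+1)*(k+2), producing j..k-1 and a last element last.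
theorem pvGoA_spec (f k : Int) (hlo : k * (k + 1) ≤ 2 * f) (hhi : 2 * f < (k + 1) * (k + 2)) :
    ∀ (n : ℕ) (j rem last : Int), 1 ≤ j → j ≤ k → (k - j).toNat = n →
      2 * rem = 2 * f - (j - 1) * j → 2 * last = 2 * f - (k - 1) * k →
      pvGoA j rem = PySem.List.pyRange j k 1 ++ [last] := by
  intro n
  induction n with
  | zero =>
    intro j rem last hj1 hjk hn hrem hlast
    have hjk' : j = k := by omega
    subst hjk'
    have hstop : 2 * j ≥ rem := by nlinarith
    have hrl : rem = last := by omega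
    rw [pvGoA.eq_def, if_pos hstop, PySem.List.pyRange_one_eq_nil (by omega), hrl,
      List.nil_append]
  | succ n ih =>
    intro j rem last hj1 hjk hn hrem hlast
    have hjlt : j < k := by omega
    have hcont : ¬ (2 * j ≥ rem) := by nlinarith [(k - j - 1) * (k + j + 2)]
    rw [pvGoA.eq_def, if_neg hcont, PySem.List.pyRange_one_cons hjlt]
    have hrec := ih (j + 1) (rem - j) last (by omega) (by omega) (by omega)
      (by ring_nf; ring_nf at hrem; omega) hlast
    rw [hrec, List.cons_append]

-- characterization of B's k via Nat.sqrt, for f ≥ 3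
theorem pvK_bounds (f : Int) (hf : 3 ≤ f) :
    let k : Int := PySem.Int.floordiv ((Nat.sqrt (8 * f + 1).toNat : Int) - 1) 2
    1 ≤ k ∧ k * (k + 1) ≤ 2 * f ∧ 2 * f < (k + 1) * (k + 2) := by
  intro k
  set s : ℕ := Nat.sqrt (8 * f + 1).toNat with hs
  have hm : ((8 * f + 1).toNat : Int) = 8 * f + 1 := by omega
  have h1 : (s : Int) * s ≤ 8 * f + 1 := by
    have h : s * s ≤ (8 * f + 1).toNat := by
      have := Nat.sqrt_le' (8 * f + 1).toNat
      simpa [hs, pow_two] using this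
    rw [← hm]; exact_mod_cast h
  have h2 : 8 * f + 1 < ((s : Int) + 1) * ((s : Int) + 1) := by
    have h : (8 * f + 1).toNat < (s + 1) * (s + 1) := by
      have := Nat.lt_succ_sqrt' (8 * f + 1).toNat
      simpa [hs, pow_two, Nat.succ_eq_add_one] using this
    rw [← hm]; exact_mod_cast h
  have hsnn : (0 : Int) ≤ (s : Int) := Int.natCast_nonneg s
  have hs5 : 5 ≤ (s : Int) := by
    by_contra h
    have hs4 : (s : Int) ≤ 4 := by omega
    nlinarith
  have hkdef : k = ((s : Int) - 1) / 2 := by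
    simp only [k, PySem.Int.floordiv_eq_ediv_of_pos (by omega : (0:Int) < 2)]
    rw [← hs]
  have hk1 : 2 * k ≤ (s : Int) - 1 ∧ (s : Int) - 1 ≤ 2 * k + 1 := by omega
  have ha : (2 * k + 1) * (2 * k + 1) ≤ (s : Int) * (s : Int) :=
    mul_self_le_mul_self (by omega) (by omega)
  have hb : ((s : Int) + 1) * ((s : Int) + 1) ≤ (2 * k + 3) * (2 * k + 3) :=
    mul_self_le_mul_self (by omega) (by omega)
  refine ⟨by omega, by nlinarith, by nlinarith⟩

-- ===== VERDICT (by name: the statement is the Claim_ definition above) =====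
theorem Pairwise_Distinct_Summand_spec : Claim_equal_Pairwise_Distinct_Summand := by
  intro f _
  unfold Spec_Pairwise_Distinct_Summand Pairwise_Distinct_Summand
  by_cases hf : f ≤ 2
  · unfold Pairwise_Distinct_Summand_alt
    rw [if_pos hf, pvGoA.eq_def, if_pos (by omega)]
  · obtain ⟨hk1, hlo, hhi⟩ := pvK_bounds f (by omega)
    simp only [Pairwise_Distinct_Summand_alt, if_neg hf]
    set k : Int := PySem.Int.floordiv ((Nat.sqrt (8 * f + 1).toNat : Int) - 1) 2 with hk
    have heven : Even ((k - 1) * k) := by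
      have := Int.even_mul_succ_self (k - 1)
      have he : (k - 1) * (k - 1 + 1) = (k - 1) * k := by ring
      rwa [he] at this
    obtain ⟨m, hm⟩ := heven
    have hdiv : PySem.Int.floordiv ((k - 1) * k) 2 = m := by
      rw [PySem.Int.floordiv_eq_ediv_of_pos (by omega : (0:Int) < 2), hm]
      omega
    rw [hdiv]
    exact pvGoA_spec f k hlo hhi (k - 1).toNat 1 f (f - m) (by omega) hk1 rfl (by ring) (by omega)
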